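-- pv_equiv track=rewrite | github.com/dijksterhuis/cleverspeech-py | graph/Paths.py | _create_path_indices
-- ===== SOURCE A (Python) =====
-- def _create_path_indices(new_target, n_feats, repeats):
--
--     """
--     Taking into account the space we have available, find out the new argmax
--     indices for each frame of audio which relate to our target phrase
--
--     :param new_target: the new target phrase included additional blank tokens
--     :param n_feats: the number of features in the logits (time steps)
--     :param length: the actual length of the transcription with blanks inserted
--     :param repeats: the number of repeats for each token
--
--     :return: the index for each frame in turn
--     """
--
--     spacing = n_feats // len(new_target)
--
--     # guarantee non-minus number of characters
--     n_chars = repeats - 1 if repeats > 0 else 0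
--
--     for t in new_target:
--         for i in range(spacing):
--             if i <= n_chars:
--                 yield t
--             else:
--                 yield 28
-- ===== SOURCE B (Python) =====
-- def _create_path_indices(new_target, n_feats, repeats):
--     spacing = n_feats // len(new_target)
--     n_chars = repeats - 1 if repeats > 0 else 0
--     blanks = [28] * len(new_target)
--     # column i of the frame matrix: the token column while i <= n_chars, else a blank column
--     columns = [list(new_target) if i <= n_chars else blanks for i in range(spacing)]
--     # transpose column-major -> row-major: row t is token t's frames in frame order
--     for row in zip(*columns):
--         yield from row
-- ===== Notes on version B (the rewrite author's own statement) =====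
-- stated objective: alternative
-- what changed: B builds the frame matrix column-major (one column per frame slot: the whole token list while i <= n_chars, else a shared blank column) and transposes it with zip(*columns), instead of A's nested per-token inner loop with a per-index if/else; the per-frame Python-level branch disappears into bulk list construction and zip.
import Mathlib
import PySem

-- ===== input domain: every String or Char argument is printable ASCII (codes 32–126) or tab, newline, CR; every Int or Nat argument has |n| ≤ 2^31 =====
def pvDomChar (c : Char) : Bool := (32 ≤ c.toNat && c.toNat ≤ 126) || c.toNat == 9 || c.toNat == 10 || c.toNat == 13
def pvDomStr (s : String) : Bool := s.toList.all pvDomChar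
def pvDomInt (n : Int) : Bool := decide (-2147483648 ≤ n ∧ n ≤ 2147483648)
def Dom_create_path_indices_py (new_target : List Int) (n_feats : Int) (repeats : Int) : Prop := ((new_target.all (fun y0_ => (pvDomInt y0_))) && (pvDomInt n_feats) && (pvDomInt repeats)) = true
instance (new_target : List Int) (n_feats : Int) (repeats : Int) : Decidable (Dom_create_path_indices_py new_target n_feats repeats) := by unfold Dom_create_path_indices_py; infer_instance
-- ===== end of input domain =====

-- B builds the frame matrix column-major (one column per frame slot) and transposes it with
-- zip(*columns), instead of A's nested per-token loop with a per-index if/else; same cost,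
-- a genuinely different traversal.

-- ===== PORT A =====
-- literal port of A: nested loops, inner loop over range(spacing) with per-index if/else
def create_path_indices_py (new_target : List Int) (n_feats : Int) (repeats : Int) : List Int :=
  let spacing := PySem.Int.floordiv n_feats (new_target.length : Int)
  let n_chars := if repeats > 0 then repeats - 1 else 0
  new_target.foldl (fun acc t =>
    (PySem.List.pyRange 0 spacing 1).foldl
      (fun acc2 i => acc2 ++ [if i ≤ n_chars then t else 28]) acc) []

-- ===== PORT B =====
-- Python's zip(*cols): rows of heads while every column is nonempty (zip() with no
-- arguments, i.e. cols = [], yields nothing); exact for columns of equal length as here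
def pvZipRows (cols : List (List Int)) : List (List Int) :=
  if h : cols = [] ∨ cols.any (fun c => c.isEmpty) then []
  else (cols.map (fun c => c.headD 0)) :: pvZipRows (cols.map (fun c => c.tail))
termination_by (cols.headD []).length
decreasing_by
  simp only [not_or, List.any_eq_true, not_exists, not_and] at h
  obtain ⟨h1, h2⟩ := h
  cases cols with
  | nil => exact absurd rfl h1
  | cons c cs =>
    have hc : ¬ c.isEmpty = true := h2 c (by simp)
    simp only [List.map_cons, List.headD_cons, List.length_tail]
    cases c with
    | nil => simp at hc
    | cons a as => simp

-- port of B: one column per frame slot (token column or blank column), then transpose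
def create_path_indices_py_alt (new_target : List Int) (n_feats : Int) (repeats : Int) : List Int :=
  let spacing := PySem.Int.floordiv n_feats (new_target.length : Int)
  let n_chars := if repeats > 0 then repeats - 1 else 0
  let blanks := List.replicate new_target.length (28 : Int)
  let columns := (PySem.List.pyRange 0 spacing 1).map
    (fun i => if i ≤ n_chars then new_target else blanks)
  (pvZipRows columns).flatten

-- ===== PRECONDITION & SPEC =====
-- Pre_ excludes only the empty new_target, where both Pythons raise ZeroDivisionError.
def Pre_create_path_indices_py (new_target : List Int) (n_feats : Int) (repeats : Int) : Prop :=
  new_target ≠ []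
instance (new_target : List Int) (n_feats : Int) (repeats : Int) : Decidable (Pre_create_path_indices_py new_target n_feats repeats) := by unfold Pre_create_path_indices_py; infer_instance

def pvWitness_create_path_indices_py : List Int × Int × Int := ([1, 2], 7, 2)

def Spec_create_path_indices_py (new_target : List Int) (n_feats : Int) (repeats : Int) (out : List Int) : Prop := out = create_path_indices_py_alt new_target n_feats repeats
instance (new_target : List Int) (n_feats : Int) (repeats : Int) (out : List Int) : Decidable (Spec_create_path_indices_py new_target n_feats repeats out) := by unfold Spec_create_path_indices_py; infer_instance

-- ===== CLAIM (what is proved, stated in full; the proofs are below) =====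
def Claim_equal_create_path_indices_py : Prop := ∀ (new_target : List Int) (n_feats : Int) (repeats : Int), Dom_create_path_indices_py new_target n_feats repeats → Pre_create_path_indices_py new_target n_feats repeats → Spec_create_path_indices_py new_target n_feats repeats (create_path_indices_py new_target n_feats repeats)

-- ===== LEMMAS AND PROOFS =====

-- transposing columns that are all maps of the same base list yields, row by row,
-- the per-element images under each column's function
lemma pvZipRows_map_cols (gs : List (Int → Int)) (hgs : gs ≠ []) :
    ∀ xs : List Int,
      pvZipRows (gs.map (fun g => xs.map g)) = xs.map (fun x => gs.map (fun g => g x)) := by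
  intro xs
  induction xs with
  | nil =>
    have hcond : (List.map (fun g => List.map g ([] : List Int)) gs = [] ∨
        ((List.map (fun g => List.map g ([] : List Int)) gs).any fun c => c.isEmpty) = true) := by
      cases gs with
      | nil => exact absurd rfl hgs
      | cons g gs' => right; simp
    rw [pvZipRows, dif_pos hcond]
    simp
  | cons x xs' ih =>
    have hcond : ¬ (List.map (fun g => List.map g (x :: xs')) gs = [] ∨
        ((List.map (fun g => List.map g (x :: xs')) gs).any fun c => c.isEmpty) = true) := by
      simp [hgs]
    rw [pvZipRows, dif_neg hcond]
    simp only [List.map_map, Function.comp_def, List.map_cons, List.headD_cons, List.tail_cons]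
    rw [ih]

-- ===== VERDICT (by name: the statement is the Claim_ definition above) =====
theorem create_path_indices_py_spec : Claim_equal_create_path_indices_py := by
  intro new_target n_feats repeats _ _
  unfold Spec_create_path_indices_py
  simp only [create_path_indices_py, create_path_indices_py_alt]
  set spacing := PySem.Int.floordiv n_feats (new_target.length : Int) with hs
  set n_chars := (if repeats > 0 then repeats - 1 else 0) with hnc
  -- A as a flatMap of its per-token blocks
  have hA : new_target.foldl (fun acc t =>
      (PySem.List.pyRange 0 spacing 1).foldl
        (fun acc2 i => acc2 ++ [if i ≤ n_chars then t else 28]) acc) []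
      = new_target.flatMap (fun t =>
          (PySem.List.pyRange 0 spacing 1).map (fun i => if i ≤ n_chars then t else (28 : Int))) := by
    have hstep : (fun (acc : List Int) t =>
        (PySem.List.pyRange 0 spacing 1).foldl
          (fun acc2 i => acc2 ++ [if i ≤ n_chars then t else (28 : Int)]) acc)
        = fun (acc : List Int) t => acc ++
            (PySem.List.pyRange 0 spacing 1).map (fun i => if i ≤ n_chars then t else 28) := by
      funext acc t
      rw [PySem.List.foldl_append_singleton_eq_map]
    rw [hstep, PySem.List.foldl_append_eq_flatMap, List.nil_append]
  rw [hA]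
  -- B's columns as maps of new_target under per-column functions
  have hcols : (PySem.List.pyRange 0 spacing 1).map
      (fun i => if i ≤ n_chars then new_target else List.replicate new_target.length (28 : Int))
      = ((PySem.List.pyRange 0 spacing 1).map
          (fun i => fun x : Int => if i ≤ n_chars then x else 28)).map
          (fun g => new_target.map g) := by
    rw [List.map_map]
    refine List.map_congr_left ?_
    intro i _
    by_cases h : i ≤ n_chars
    · simp [h]
    · simp [h, List.map_const']
  rw [hcols]
  cases hgs : (PySem.List.pyRange 0 spacing 1).map
      (fun i => fun x : Int => if i ≤ n_chars then x else (28 : Int)) with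
  | nil =>
    -- spacing ≤ 0: the range is empty; both sides are []
    have hrange : PySem.List.pyRange 0 spacing 1 = [] := by
      cases hr : PySem.List.pyRange 0 spacing 1 with
      | nil => rfl
      | cons a as => rw [hr] at hgs; simp at hgs
    rw [hrange]
    simp [pvZipRows]
  | cons g gs' =>
    rw [← hgs, pvZipRows_map_cols _ (by rw [hgs]; simp), ← List.flatMap_def]
    simp only [List.map_map, Function.comp_def]
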